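-- pv_equiv track=rewrite | github.com/jamiejamiebobamie/tweet-generator | stochasticFILE.py | checkChars
-- ===== SOURCE A (Python) =====
-- def checkChars(myTweet):
--     """checks to see how many characters there are in myTweet. if there are less
--     than 140 then it returns True."""
--     punctuation = [".", "!" , "?"]
--     counter = 0
--     period = False
--     for chars in myTweet:
--         counter += 1
--         if counter > 140 and chars in punctuation:
--             period = True
--         elif counter > 300:
--             period = True
--     if period == False:
--         return True
--     else:
--         return False
-- ===== SOURCE B (Python) =====
-- def checkChars(myTweet):
--     """tweet is valid iff it has at most 300 characters and no sentence
--     punctuation (. ! ?) occurs after the 140th character: checked by one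
--     length test plus one str.find substring search per punctuation mark,
--     each starting at offset 140."""
--     if len(myTweet) > 300:
--         return False
--     for p in ".!?":
--         if myTweet.find(p, 140) != -1:
--             return False
--     return True
-- ===== Notes on version B (the rewrite author's own statement) =====
-- stated objective: alternative
-- what changed: Replaces the per-character counter/flag loop by a closed-form length test plus three staged str.find(p, 140) substring searches, one per punctuation mark, so no character-by-character state is maintained at all.
import Mathlib
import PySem

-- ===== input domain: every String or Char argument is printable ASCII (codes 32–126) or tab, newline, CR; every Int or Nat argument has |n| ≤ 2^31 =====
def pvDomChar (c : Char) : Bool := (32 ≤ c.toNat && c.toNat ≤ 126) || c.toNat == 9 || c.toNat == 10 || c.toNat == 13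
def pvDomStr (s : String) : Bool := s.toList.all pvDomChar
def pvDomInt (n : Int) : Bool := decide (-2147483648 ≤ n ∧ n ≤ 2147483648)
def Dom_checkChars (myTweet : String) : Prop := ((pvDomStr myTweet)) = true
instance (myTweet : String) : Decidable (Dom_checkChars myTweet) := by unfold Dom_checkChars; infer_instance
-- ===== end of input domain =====

-- B replaces A's per-character counter/flag loop by a length test plus three staged str.find substring searches starting at offset 140 (alternative decomposition).


-- ===== PORT A =====
-- literal transliteration: counter/period state threaded through a left fold over the characters
def checkChars (myTweet : String) : Bool :=
  let punctuation : List Char := ['.', '!', '?']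
  let res := myTweet.toList.foldl (fun (st : Int × Bool) (chars : Char) =>
    let counter := st.1 + 1
    let period :=
      if counter > 140 && punctuation.contains chars then true
      else if counter > 300 then true
      else st.2
    (counter, period)) (0, false)
  if res.2 == false then true else false

-- ===== PORT B =====
-- Source B: early length test, then one str.find(p, 140) per punctuation mark
-- (the early-returning for-loop is the short-circuiting List.all over the marks)
def checkChars_alt (myTweet : String) : Bool :=
  if myTweet.toList.length > 300 then false
  else
    (['.', '!', '?'] : List Char).all
      (fun p => PySem.Str.findFrom myTweet (String.ofList [p]) 140 none == -1)

-- ===== PRECONDITION & SPEC =====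
def Spec_checkChars (myTweet : String) (out : Bool) : Prop := out = checkChars_alt myTweet
instance (myTweet : String) (out : Bool) : Decidable (Spec_checkChars myTweet out) := by unfold Spec_checkChars; infer_instance

-- ===== CLAIM (what is proved, stated in full; the proofs are below) =====
def Claim_equal_checkChars : Prop := ∀ (myTweet : String), Dom_checkChars myTweet → Spec_checkChars myTweet (checkChars myTweet)

-- ===== LEMMAS AND PROOFS =====

def pvPunct : List Char := ['.', '!', '?']

def pvStep (st : Int × Bool) (chars : Char) : Int × Bool :=
  let counter := st.1 + 1
  let period :=
    if counter > 140 && pvPunct.contains chars then true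
    else if counter > 300 then true
    else st.2
  (counter, period)

theorem pvLoop_char (cs : List Char) (n : Int) (hn : 0 ≤ n) (p : Bool)
    (hinv : n ≤ 300 ∨ p = true) :
    (cs.foldl pvStep (n, p)).2 =
      (p || decide (n + cs.length > 300) ||
        (cs.drop (140 - n).toNat).any (fun c => pvPunct.contains c)) := by
  induction cs generalizing n p with
  | nil =>
    rcases hinv with h | h
    · simp; omega
    · simp [h]
  | cons c cs ih =>
    have hinv' : n + 1 ≤ 300 ∨ (pvStep (n, p) c).2 = true := by
      by_cases h300 : n + 1 > 300
      · right; simp [pvStep, h300]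
      · left; omega
    rw [List.foldl_cons,
      show pvStep (n, p) c = (n + 1, (pvStep (n, p) c).2) from rfl,
      ih (n + 1) (by omega) _ hinv']
    have hq : (pvStep (n, p) c).2 =
        (if (n + 1 > 140 : Prop) ∧ pvPunct.contains c = true then true
          else if (n + 1 > 300 : Prop) then true else p) := by
      simp [pvStep]
    rw [hq]
    have hlen : (0:Int) ≤ cs.length := Int.natCast_nonneg _
    by_cases h140 : n + 1 > 140
    · have hd : (140 - n).toNat = 0 := by omega
      have hd' : (140 - (n + 1)).toNat = 0 := by omega
      rw [hd, hd', List.drop_zero, List.drop_zero, List.any_cons]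
      rw [Bool.eq_iff_iff]
      simp [h140, List.length_cons]
      constructor
      · rintro (((h | h | h) | h) | h)
        · exact Or.inr (Or.inl h)
        · exact Or.inl (Or.inr (by omega))
        · exact Or.inl (Or.inl h)
        · exact Or.inl (Or.inr (by omega))
        · exact Or.inr (Or.inr h)
      · rintro ((h | h) | h | h)
        · exact Or.inl (Or.inl (Or.inr (Or.inr h)))
        · exact Or.inl (Or.inr (by omega))
        · exact Or.inl (Or.inl (Or.inl h))
        · exact Or.inr h
    · have h300 : ¬ (n + 1 > 300) := by omega
      have hd : (140 - n).toNat = (140 - (n + 1)).toNat + 1 := by omega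
      rw [hd, List.drop_succ_cons]
      rw [Bool.eq_iff_iff]
      simp [h140, h300, List.length_cons]
      have harith : (300 < n + 1 + ((cs.length : Nat) : Int)) ↔
          (300 < n + (((cs.length : Nat) : Int) + 1)) := by omega
      rw [harith]

-- A computes: length ≤ 300 and no punctuation character in the tail after index 140
theorem checkChars_char (s : String) :
    checkChars s = (decide (s.toList.length ≤ 300) &&
      !((s.toList.drop 140).any (fun c => pvPunct.contains c))) := by
  rw [show checkChars s =
      (if (s.toList.foldl pvStep ((0 : Int), false)).2 == false then true else false) from rfl]
  rw [pvLoop_char s.toList 0 le_rfl false (Or.inl (by norm_num))]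
  rw [show ((140 : Int) - 0).toNat = 140 from rfl]
  rw [Bool.eq_iff_iff]
  simp

-- [c] is an infix of l exactly when c is a member of l
theorem singleton_infix_iff_mem (c : Char) (l : List Char) : [c] <:+: l ↔ c ∈ l := by
  constructor
  · intro h
    exact h.subset (List.mem_singleton_self c)
  · intro h
    obtain ⟨l₁, l₂, rfl⟩ := List.append_of_mem h
    exact ⟨l₁, l₂, by simp⟩

-- str.find(c, 140) = -1 exactly when the character c does not occur at index ≥ 140
theorem findFrom_singleton_eq (s : String) (c : Char) :
    (PySem.Chars.findFrom s.toList [c] 140 none = -1) ↔ c ∉ s.toList.drop 140 := by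
  by_cases hk : 140 ≤ s.toList.length
  · have h := PySem.Chars.findFrom_natCast_eq_neg_one_iff s.toList [c] 140 hk
    rw [show (((140 : Nat) : Int)) = (140 : Int) from rfl] at h
    rw [h, singleton_infix_iff_mem]
  · have hnil : s.toList.drop 140 = [] := List.drop_eq_nil_of_le (by omega)
    have hlt : (s.length : Int) < 140 := by
      have h1 : s.toList.length = s.length := by simp
      omega
    have hfind : PySem.Chars.findFrom s.toList [c] 140 none = -1 := by
      simp only [PySem.Chars.findFrom]
      norm_num
      intro h _
      omega
    simp [hfind, hnil]

-- B also computes: length ≤ 300 and no punctuation character in the tail after index 140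
theorem checkChars_alt_char (s : String) :
    checkChars_alt s = (decide (s.toList.length ≤ 300) &&
      !((s.toList.drop 140).any (fun c => pvPunct.contains c))) := by
  have hf : ∀ p : Char, (PySem.Str.findFrom s (String.ofList [p]) 140 none == -1)
      = decide (p ∉ s.toList.drop 140) := by
    intro p
    rw [Bool.eq_iff_iff]
    have htl : (String.ofList [p]).toList = [p] := by simp
    simp only [beq_iff_eq, decide_eq_true_eq, PySem.Str.findFrom_eq, htl]
    exact findFrom_singleton_eq s p
  rw [show checkChars_alt s = (if s.toList.length > 300 then false
       else (['.', '!', '?'] : List Char).all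
         (fun p => PySem.Str.findFrom s (String.ofList [p]) 140 none == -1)) from rfl]
  by_cases hlen : s.toList.length ≤ 300
  · rw [if_neg (by omega), Bool.eq_iff_iff]
    simp only [List.all_cons, List.all_nil, hf, Bool.and_true, Bool.and_eq_true,
      decide_eq_true_eq, Bool.not_eq_true', List.any_eq_false, List.contains_eq_mem,
      pvPunct, List.mem_cons, List.not_mem_nil, or_false]
    constructor
    · rintro ⟨h1, h2, h3⟩
      exact ⟨by omega, fun c hc hmem => by rcases hmem with rfl | rfl | rfl <;> tauto⟩
    · rintro ⟨-, h⟩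
      refine ⟨fun hc => h _ hc (by tauto), fun hc => h _ hc (by tauto), fun hc => h _ hc (by tauto)⟩
  · rw [if_pos (by omega), Bool.eq_iff_iff]
    simp only [Bool.and_eq_true, decide_eq_true_eq]
    constructor
    · intro h; cases h
    · intro h; exact absurd h.1 hlen

theorem checkChars_eq (s : String) : checkChars s = checkChars_alt s := by
  rw [checkChars_char, checkChars_alt_char]

-- ===== VERDICT (by name: the statement is the Claim_ definition above) =====
theorem checkChars_spec : Claim_equal_checkChars := by
  intro s _
  unfold Spec_checkChars
  exact checkChars_eq s
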